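-- pv_equiv track=rewrite | github.com/samhorsfield96/panGPT | panPrompt.py | pad_blocks
-- ===== SOURCE A (Python) =====
-- def pad_blocks(input_list, block_size, pad_token="<pad>"):
--     # Initialize the result list
--     result = []
--     attention_mask = []
--
--     # Iterate over the list in steps of block_size
--     for i in range(0, len(input_list), block_size):
--         # Get the current block
--         block = input_list[i:i + block_size]
--         attention_block = [1] * len(block)
--
--         # Check if the block needs padding
--         if len(block) < block_size:
--             # Pad the block to the required block size
--             attention_block += [0] * (block_size - len(block))
--             block += [pad_token] * (block_size - len(block))
--
--         # Add the block to the result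
--         result.append(block)
--         attention_mask.append(attention_block)
--
--     return result, attention_mask
-- ===== SOURCE B (Python) =====
-- def pad_blocks(input_list, block_size, pad_token="<pad>"):
--     n = len(input_list)
--     pad = (-n) % block_size
--     padded = input_list + [pad_token] * pad
--     mask = [1] * n + [0] * pad
--     blocks = [padded[i:i + block_size] for i in range(0, len(padded), block_size)]
--     masks = [mask[i:i + block_size] for i in range(0, len(mask), block_size)]
--     return blocks, masks
-- ===== Notes on version B (the rewrite author's own statement) =====
-- stated objective: alternative
-- what changed: B pads the whole list once (global pad count via (-n) % block_size) and builds one flat attention vector, then uniformly chunks both with range-step slicing, replacing A's per-block conditional padding inside the loop.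
import Mathlib
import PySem

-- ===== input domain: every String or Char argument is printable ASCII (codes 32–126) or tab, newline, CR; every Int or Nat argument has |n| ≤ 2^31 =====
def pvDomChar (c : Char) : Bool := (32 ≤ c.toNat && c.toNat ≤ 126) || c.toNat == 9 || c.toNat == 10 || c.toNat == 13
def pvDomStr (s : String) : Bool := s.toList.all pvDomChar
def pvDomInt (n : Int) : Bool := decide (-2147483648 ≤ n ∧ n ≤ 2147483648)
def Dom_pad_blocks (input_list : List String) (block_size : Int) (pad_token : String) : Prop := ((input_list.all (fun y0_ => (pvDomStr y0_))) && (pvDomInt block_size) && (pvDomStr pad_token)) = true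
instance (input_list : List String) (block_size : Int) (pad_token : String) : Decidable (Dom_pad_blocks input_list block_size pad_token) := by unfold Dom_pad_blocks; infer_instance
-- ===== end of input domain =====

-- B pads the whole list once (global pad count) and chunks both lists uniformly, instead of
-- A's per-block conditional padding inside the loop (objective: alternative decomposition, same cost).

-- ===== PORT A =====
-- the (possibly padded) block starting at index i:  block = input_list[i:i+block_size]; if len(block) < block_size: block += [pad_token] * (block_size - len(block))
def pvBlockA (input_list : List String) (block_size : Int) (pad_token : String) (i : Int) : List String :=
  let block := PySem.List.slice input_list (some i) (some (i + block_size))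
  if (block.length : Int) < block_size then
    -- a Python list times a non-positive count is empty, hence .toNat
    block ++ List.replicate (block_size - (block.length : Int)).toNat pad_token
  else block

-- its attention row:  attention_block = [1] * len(block); if short: attention_block += [0] * (block_size - len(block))
def pvAttnA (input_list : List String) (block_size : Int) (i : Int) : List Int :=
  let block := PySem.List.slice input_list (some i) (some (i + block_size))
  let attention_block := List.replicate block.length (1 : Int)
  if (block.length : Int) < block_size then
    attention_block ++ List.replicate (block_size - (block.length : Int)).toNat (0 : Int)
  else attention_block

-- for i in range(0, len(input_list), block_size): result.append(block); attention_mask.append(attention_block)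
def pad_blocks (input_list : List String) (block_size : Int) (pad_token : String) : List (List String) × List (List Int) :=
  (PySem.List.pyRange 0 (PySem.List.len input_list) block_size).foldl
    (fun acc i => (acc.1 ++ [pvBlockA input_list block_size pad_token i],
                   acc.2 ++ [pvAttnA input_list block_size i]))
    ([], [])

-- ===== PORT B =====
def pad_blocks_alt (input_list : List String) (block_size : Int) (pad_token : String) : List (List String) × List (List Int) :=
  let n := input_list.length
  -- pad = (-n) % block_size; a Python list times a negative count is empty, hence .toNat
  let pad := (PySem.Int.mod (-(n : Int)) block_size).toNat
  let padded := input_list ++ List.replicate pad pad_token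
  let mask := List.replicate n (1 : Int) ++ List.replicate pad (0 : Int)
  let blocks := (PySem.List.pyRange 0 (PySem.List.len padded) block_size).map
      (fun i => PySem.List.slice padded (some i) (some (i + block_size)))
  let masks := (PySem.List.pyRange 0 (PySem.List.len mask) block_size).map
      (fun i => PySem.List.slice mask (some i) (some (i + block_size)))
  (blocks, masks)

-- ===== PRECONDITION & SPEC =====
-- Pre_ excludes exactly block_size = 0, where the Python A raises ValueError (range() step 0; B raises ZeroDivisionError there).
def Pre_pad_blocks (input_list : List String) (block_size : Int) (pad_token : String) : Prop :=
  block_size ≠ 0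
instance (input_list : List String) (block_size : Int) (pad_token : String) : Decidable (Pre_pad_blocks input_list block_size pad_token) := by unfold Pre_pad_blocks; infer_instance

def pvWitness_pad_blocks : List String × Int × String := (["a", "b", "c"], 2, "<pad>")

def Spec_pad_blocks (input_list : List String) (block_size : Int) (pad_token : String) (out : List (List String) × List (List Int)) : Prop := out = pad_blocks_alt input_list block_size pad_token
instance (input_list : List String) (block_size : Int) (pad_token : String) (out : List (List String) × List (List Int)) : Decidable (Spec_pad_blocks input_list block_size pad_token out) := by unfold Spec_pad_blocks; infer_instance

-- ===== CLAIM (what is proved, stated in full; the proofs are below) =====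
def Claim_equal_pad_blocks : Prop := ∀ (input_list : List String) (block_size : Int) (pad_token : String), Dom_pad_blocks input_list block_size pad_token → Pre_pad_blocks input_list block_size pad_token → Spec_pad_blocks input_list block_size pad_token (pad_blocks input_list block_size pad_token)

-- ===== LEMMAS AND PROOFS =====

-- negative step: range(0, m, s) is empty for m ≥ 0
lemma pyRange_neg_nil (m s : Int) (h : s < 0) (hm : 0 ≤ m) : PySem.List.pyRange 0 m s = [] := by
  simp [PySem.List.pyRange, h.ne, not_lt.mpr h.le, not_lt.mpr hm]

lemma pad_blocks_eq_of_neg (input_list : List String) (block_size : Int) (pad_token : String)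
    (h : block_size < 0) :
    pad_blocks input_list block_size pad_token = pad_blocks_alt input_list block_size pad_token := by
  have h1 : PySem.List.pyRange 0 ((input_list.length : Int)) block_size = [] :=
    pyRange_neg_nil _ _ h (Int.natCast_nonneg _)
  have h2 : ∀ m : Int,
      PySem.List.pyRange 0 ((input_list.length : Int) + max m 0) block_size = [] := fun m =>
    pyRange_neg_nil _ _ h (add_nonneg (Int.natCast_nonneg _) (le_max_right _ _))
  unfold pad_blocks pad_blocks_alt
  simp [h1, h2]

-- taking a block out of the once-padded list = take the block then append the missing tail
lemma pad_chunk {α : Type} (L : List α) (z : α) (pp b j : Nat)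
    (hjn : j ≤ L.length) (hjb : j + b ≤ L.length + pp) :
    ((L ++ List.replicate pp z).drop j).take b
      = (L.drop j).take b ++ List.replicate (b - (L.length - j)) z := by
  rw [List.drop_append, List.take_append]
  have h1 : j - L.length = 0 := by omega
  rw [h1, List.drop_zero, List.take_replicate]
  congr 2
  simp only [List.length_drop]
  omega

-- the A-side fold is the pair of maps of the two step helpers
lemma pad_blocks_fold_eq_map (input_list : List String) (block_size : Int) (pad_token : String)
    (R : List Int) (a1 : List (List String)) (a2 : List (List Int)) :
    R.foldl (fun acc i => (acc.1 ++ [pvBlockA input_list block_size pad_token i],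
                           acc.2 ++ [pvAttnA input_list block_size i])) (a1, a2)
      = (a1 ++ R.map (pvBlockA input_list block_size pad_token),
         a2 ++ R.map (pvAttnA input_list block_size)) := by
  induction R generalizing a1 a2 with
  | nil => simp
  | cons x xs ih => simp [ih]

lemma pad_blocks_eq_of_pos (input_list : List String) (block_size : Int) (pad_token : String)
    (h : 0 < block_size) :
    pad_blocks input_list block_size pad_token = pad_blocks_alt input_list block_size pad_token := by
  obtain ⟨n, hn⟩ : ∃ n, n = input_list.length := ⟨_, rfl⟩
  obtain ⟨p, hpdef⟩ : ∃ p, p = PySem.Int.mod (-(n : Int)) block_size := ⟨_, rfl⟩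
  obtain ⟨q, hqdef⟩ : ∃ q, q = -PySem.Int.floordiv (-(n : Int)) block_size := ⟨_, rfl⟩
  have hp0 : 0 ≤ p := hpdef ▸ PySem.Int.mod_nonneg _ h
  have hpb : p < block_size := hpdef ▸ PySem.Int.mod_lt _ h
  have hq := PySem.Int.floordiv_mul_add_mod (-(n : Int)) block_size
  have hnp : (n : Int) + p = q * block_size := by
    rw [hpdef, hqdef]; linarith
  -- the two index ranges coincide
  have hrange : PySem.List.pyRange 0 ((n : Int)) block_size
      = PySem.List.pyRange 0 ((n : Int) + p) block_size := by
    rw [PySem.List.pyRange_of_pos _ _ h, PySem.List.pyRange_of_pos _ _ h]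
    congr 2
    simp only [sub_zero]
    by_cases hn0 : (0 : Int) < (n : Int)
    · rw [if_pos hn0, if_pos (by omega)]
      have e1 : (n : Int) + block_size - 1 = (block_size - 1 - p) + block_size * q := by
        linear_combination hnp
      have e2 : (n : Int) + p + block_size - 1 = (block_size - 1) + block_size * q := by
        linear_combination hnp
      rw [e1, e2, Int.add_mul_ediv_left _ _ h.ne', Int.add_mul_ediv_left _ _ h.ne',
        Int.ediv_eq_zero_of_lt (by omega) (by omega),
        Int.ediv_eq_zero_of_lt (by omega) (by omega)]
    · have hp' : p = 0 := by
        rw [hpdef, show (-(n : Int)) = 0 by omega]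
        exact (PySem.Int.mod_eq_zero_iff_dvd 0 block_size).mpr (dvd_zero _)
      rw [if_neg hn0, if_neg (by omega)]
  -- bounds for every index in the range
  have hbounds : ∀ i ∈ PySem.List.pyRange 0 ((n : Int) + p) block_size,
      0 ≤ i ∧ i + block_size ≤ (n : Int) + p := by
    intro i hi
    rw [PySem.List.mem_pyRange_iff_of_pos h] at hi
    obtain ⟨hi0, hilt, k, hk⟩ := hi
    rw [sub_zero] at hk
    refine ⟨hi0, ?_⟩
    have hkq : k < q := by
      have hlt : block_size * k < block_size * q := by
        rw [← hk, mul_comm block_size q, ← hnp]; exact hilt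
      exact lt_of_mul_lt_mul_left hlt h.le
    calc i + block_size = block_size * (k + 1) := by rw [hk]; ring
      _ ≤ block_size * q := mul_le_mul_of_nonneg_left (by omega) h.le
      _ = (n : Int) + p := by rw [hnp]; ring
  -- pointwise: A's padded block = a slice of the once-padded list
  have hblock : ∀ i ∈ PySem.List.pyRange 0 ((n : Int) + p) block_size,
      pvBlockA input_list block_size pad_token i
        = PySem.List.slice (input_list ++ List.replicate p.toNat pad_token)
            (some i) (some (i + block_size)) := by
    intro i hi
    obtain ⟨hi0, hib⟩ := hbounds i hi
    have hTN : (i + block_size).toNat - i.toNat = block_size.toNat := by omega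
    rw [PySem.List.slice_toNat _ hi0 (by omega), hTN,
      pad_chunk input_list pad_token p.toNat block_size.toNat i.toNat (by omega) (by omega)]
    unfold pvBlockA
    rw [PySem.List.slice_toNat _ hi0 (by omega), hTN]
    simp only []
    by_cases hc : ((((input_list.drop i.toNat).take block_size.toNat).length : Int) < block_size)
    · rw [if_pos hc]
      have hlen : ((input_list.drop i.toNat).take block_size.toNat).length
          = input_list.length - i.toNat := by
        simp only [List.length_take, List.length_drop]
        simp only [List.length_take, List.length_drop] at hc
        omega
      have hcount : (block_size - ((input_list.length - i.toNat : Nat) : Int)).toNat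
          = block_size.toNat - (input_list.length - i.toNat) := by omega
      rw [hlen, hcount]
    · rw [if_neg hc]
      have hcount : block_size.toNat - (input_list.length - i.toNat) = 0 := by
        simp only [List.length_take, List.length_drop] at hc
        omega
      rw [hcount, List.replicate_zero, List.append_nil]
  -- pointwise: A's attention row = a slice of the flat mask
  have hattn : ∀ i ∈ PySem.List.pyRange 0 ((n : Int) + p) block_size,
      pvAttnA input_list block_size i
        = PySem.List.slice (List.replicate n (1 : Int) ++ List.replicate p.toNat (0 : Int))
            (some i) (some (i + block_size)) := by
    intro i hi
    obtain ⟨hi0, hib⟩ := hbounds i hi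
    have hTN : (i + block_size).toNat - i.toNat = block_size.toNat := by omega
    rw [PySem.List.slice_toNat _ hi0 (by omega), hTN,
      pad_chunk (List.replicate n (1 : Int)) (0 : Int) p.toNat block_size.toNat i.toNat
        (by simp only [List.length_replicate]; omega) (by simp only [List.length_replicate]; omega),
      List.drop_replicate, List.take_replicate, List.length_replicate]
    unfold pvAttnA
    rw [PySem.List.slice_toNat _ hi0 (by omega), hTN]
    simp only []
    have hlen : ((input_list.drop i.toNat).take block_size.toNat).length
        = min block_size.toNat (n - i.toNat) := by
      simp only [List.length_take, List.length_drop]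
      omega
    rw [hlen]
    by_cases hc : (((min block_size.toNat (n - i.toNat) : Nat) : Int) < block_size)
    · rw [if_pos hc]
      have h2 : (block_size - ((min block_size.toNat (n - i.toNat) : Nat) : Int)).toNat
          = block_size.toNat - (n - i.toNat) := by omega
      have h1 : min block_size.toNat (n - i.toNat) = n - i.toNat := by omega
      rw [h2, h1]
    · rw [if_neg hc]
      have h1 : min block_size.toNat (n - i.toNat) = block_size.toNat := by omega
      have h2 : block_size.toNat - (n - i.toNat) = 0 := by omega
      rw [h1, h2, List.replicate_zero, List.append_nil]
  -- assemble
  unfold pad_blocks pad_blocks_alt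
  rw [pad_blocks_fold_eq_map]
  simp only [List.nil_append, PySem.List.len_eq, List.length_append, List.length_replicate]
  have e2 : ((input_list.length
        + (PySem.Int.mod (-(input_list.length : Int)) block_size).toNat : Nat) : Int)
      = (n : Int) + p := by
    rw [← hn, ← hpdef]; omega
  rw [e2, ← hn, ← hpdef, hrange]
  exact Prod.ext (List.map_congr_left hblock) (List.map_congr_left hattn)

-- ===== VERDICT (by name: the statement is the Claim_ definition above) =====
theorem pad_blocks_spec : Claim_equal_pad_blocks := by
  intro input_list block_size pad_token _ hpre
  unfold Spec_pad_blocks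
  rcases lt_trichotomy block_size 0 with h | h | h
  · exact pad_blocks_eq_of_neg input_list block_size pad_token h
  · exact absurd h hpre
  · exact pad_blocks_eq_of_pos input_list block_size pad_token h
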